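-- pv_equiv track=rewrite | github.com/mlynckat/mech-interp--style-in-transformer-activations | backend/src/analysis/sae_activations_exploration.py | _extract_entropy_files
-- ===== SOURCE A (Python) =====
-- from typing import Dict, List, Tuple, Union
--
-- def _extract_entropy_files(entropy_structured: Dict) -> Tuple[List[str], List[str]]:
--     """Extract entropy and cross-entropy files from structured data."""
--     entropies_files = []
--     cross_entropies_files = []
--
--     for entropy_type, authors_dict in entropy_structured.items():
--         for author, prompted_dict in authors_dict.items():
--             if 'baseline' in prompted_dict:
--                 if entropy_type == 'entropy':
--                     entropies_files.append(prompted_dict['baseline'])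
--                 elif entropy_type == 'cross_entropy_loss':
--                     cross_entropies_files.append(prompted_dict['baseline'])
--
--     return entropies_files, cross_entropies_files
-- ===== SOURCE B (Python) =====
-- def _extract_entropy_files(entropy_structured):
--     """Extract entropy and cross-entropy files from structured data."""
--     entropies_files = [d['baseline']
--                        for d in entropy_structured.get('entropy', {}).values()
--                        if 'baseline' in d]
--     cross_entropies_files = [d['baseline']
--                              for d in entropy_structured.get('cross_entropy_loss', {}).values()
--                              if 'baseline' in d]
--     return entropies_files, cross_entropies_files
-- ===== Notes on version B (the rewrite author's own statement) =====
-- stated objective: idiomatic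
-- what changed: Replaces the branching scan over every top-level entropy type with two direct keyed lookups ('entropy' and 'cross_entropy_loss') whose inner dicts are turned into lists by comprehensions; the outer loop and the type-dispatch branch disappear.
import Mathlib
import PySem

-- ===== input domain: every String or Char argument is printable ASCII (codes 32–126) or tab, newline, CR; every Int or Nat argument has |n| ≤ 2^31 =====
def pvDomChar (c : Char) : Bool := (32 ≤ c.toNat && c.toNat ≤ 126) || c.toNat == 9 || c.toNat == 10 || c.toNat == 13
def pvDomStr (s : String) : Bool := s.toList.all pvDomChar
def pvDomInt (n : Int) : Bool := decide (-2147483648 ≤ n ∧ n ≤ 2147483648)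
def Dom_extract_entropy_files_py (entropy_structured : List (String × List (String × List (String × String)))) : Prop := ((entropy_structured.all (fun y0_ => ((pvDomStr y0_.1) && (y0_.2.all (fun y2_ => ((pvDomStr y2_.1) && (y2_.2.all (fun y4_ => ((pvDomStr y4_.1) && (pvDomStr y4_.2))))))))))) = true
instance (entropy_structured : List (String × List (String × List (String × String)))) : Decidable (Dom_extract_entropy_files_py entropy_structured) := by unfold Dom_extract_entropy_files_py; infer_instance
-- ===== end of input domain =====

-- B replaces A's branching scan over all top-level keys by two direct keyed lookups
-- ('entropy' / 'cross_entropy_loss') followed by a comprehension over each inner dict's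
-- values (objective: more idiomatic; same cost).

-- shared dict primitive: first-match lookup in an association list
-- (= Python dict's 'k in d' / 'd[k]'; exact since dict keys are unique)
def pvLookup? {β : Type} (d : List (String × β)) (k : String) : Option β :=
  (d.find? (fun p => p.1 == k)).map (·.2)

-- ===== PORT A =====
-- body of A's nested loop: 'if "baseline" in prompted_dict: if entropy_type == ... append'
def pyA_step (t : String) (acc : List String × List String)
    (q : String × List (String × String)) : List String × List String :=
  match pvLookup? q.2 "baseline" with
  | some v =>
    if t == "entropy" then (acc.1 ++ [v], acc.2)
    else if t == "cross_entropy_loss" then (acc.1, acc.2 ++ [v])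
    else acc
  | none => acc

def extract_entropy_files_py (entropy_structured : List (String × List (String × List (String × String)))) : List String × List String :=
  entropy_structured.foldl (fun acc p => p.2.foldl (pyA_step p.1) acc) ([], [])

-- ===== PORT B =====
-- entropy_structured.get(k, {})
def pvGetAuthors (entropy_structured : List (String × List (String × List (String × String))))
    (k : String) : List (String × List (String × String)) :=
  ((pvLookup? entropy_structured k).getD [])

-- [d['baseline'] for d in authors_dict.values() if 'baseline' in d]
def pvBaselines (authors : List (String × List (String × String))) : List String :=
  (authors.map (·.2)).filterMap (fun d => pvLookup? d "baseline")

def extract_entropy_files_py_alt (entropy_structured : List (String × List (String × List (String × String)))) : List String × List String :=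
  (pvBaselines (pvGetAuthors entropy_structured "entropy"),
   pvBaselines (pvGetAuthors entropy_structured "cross_entropy_loss"))

-- ===== PRECONDITION & SPEC =====
-- Pre_ excludes association lists with duplicate top-level keys: those cannot arise from a
-- Python dict (A's actual input type), and on them A's scan-all and B's first-match lookup
-- are both accidental.
def Pre_extract_entropy_files_py (entropy_structured : List (String × List (String × List (String × String)))) : Prop :=
  (entropy_structured.map Prod.fst).Nodup
instance (entropy_structured : List (String × List (String × List (String × String)))) : Decidable (Pre_extract_entropy_files_py entropy_structured) := by unfold Pre_extract_entropy_files_py; infer_instance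

def pvWitness_extract_entropy_files_py : (List (String × List (String × List (String × String)))) :=
  [("entropy", [("a", [("baseline", "f1")]), ("b", [])]),
   ("cross_entropy_loss", [("c", [("baseline", "f2")])])]

def Spec_extract_entropy_files_py (entropy_structured : List (String × List (String × List (String × String)))) (out : List String × List String) : Prop := out = extract_entropy_files_py_alt entropy_structured
instance (entropy_structured : List (String × List (String × List (String × String)))) (out : List String × List String) : Decidable (Spec_extract_entropy_files_py entropy_structured out) := by unfold Spec_extract_entropy_files_py; infer_instance

-- ===== CLAIM (what is proved, stated in full; the proofs are below) =====
def Claim_equal_extract_entropy_files_py : Prop := ∀ (entropy_structured : List (String × List (String × List (String × String)))), Dom_extract_entropy_files_py entropy_structured → Pre_extract_entropy_files_py entropy_structured → Spec_extract_entropy_files_py entropy_structured (extract_entropy_files_py entropy_structured)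

-- ===== LEMMAS AND PROOFS =====

-- A's inner loop over one author dict, characterised by the type tag
theorem pyA_inner_eq (t : String) (authors : List (String × List (String × String)))
    (acc : List String × List String) :
    authors.foldl (pyA_step t) acc =
      if t = "entropy" then (acc.1 ++ pvBaselines authors, acc.2)
      else if t = "cross_entropy_loss" then (acc.1, acc.2 ++ pvBaselines authors)
      else acc := by
  induction authors generalizing acc with
  | nil => simp [pvBaselines]
  | cons q rest ih =>
    simp only [List.foldl_cons, pyA_step, pvBaselines, List.map_cons, List.filterMap_cons]
    cases h : pvLookup? q.2 "baseline" with
    | none =>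
      rw [ih]
      simp [pvBaselines]
    | some v =>
      rw [ih]
      by_cases h1 : t = "entropy"
      · simp [pvBaselines, h1]
      · by_cases h2 : t = "cross_entropy_loss" <;> simp [pvBaselines, h1, h2]

-- the entries A collects for the tag k, unconditionally
def pvCollect (entropy_structured : List (String × List (String × List (String × String))))
    (k : String) : List String :=
  (entropy_structured.filter (fun p => p.1 == k)).flatMap (fun p => pvBaselines p.2)

theorem pyA_outer_eq (es : List (String × List (String × List (String × String))))
    (acc : List String × List String) :
    es.foldl (fun acc p => p.2.foldl (pyA_step p.1) acc) acc =
      (acc.1 ++ pvCollect es "entropy", acc.2 ++ pvCollect es "cross_entropy_loss") := by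
  induction es generalizing acc with
  | nil => simp [pvCollect]
  | cons p rest ih =>
    simp only [List.foldl_cons]
    rw [pyA_inner_eq, ih]
    by_cases h1 : p.1 = "entropy"
    · simp [pvCollect, h1]
    · by_cases h2 : p.1 = "cross_entropy_loss" <;>
        simp [pvCollect, h1, h2]

theorem pvCollect_eq_nil_of_not_mem (es : List (String × List (String × List (String × String))))
    (k : String) (h : k ∉ es.map Prod.fst) : pvCollect es k = [] := by
  unfold pvCollect
  rw [List.filter_eq_nil_iff.mpr]
  · rfl
  · intro p hp hk
    exact h (List.mem_map.mpr ⟨p, hp, by simpa using hk⟩)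

theorem pvCollect_eq_alt (es : List (String × List (String × List (String × String))))
    (k : String) (hnd : (es.map Prod.fst).Nodup) :
    pvCollect es k = pvBaselines (pvGetAuthors es k) := by
  induction es with
  | nil => simp [pvCollect, pvGetAuthors, pvLookup?, pvBaselines]
  | cons p rest ih =>
    simp only [List.map_cons, List.nodup_cons] at hnd
    by_cases h : p.1 = k
    · have hrest : pvCollect rest k = [] :=
        pvCollect_eq_nil_of_not_mem rest k (h ▸ hnd.1)
      unfold pvCollect at hrest ⊢
      unfold pvGetAuthors pvLookup?
      simp [h, hrest]
    · have ih' := ih hnd.2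
      unfold pvCollect pvGetAuthors pvLookup? at ih' ⊢
      simpa [List.filter_cons, h] using ih'

-- ===== VERDICT (by name: the statement is the Claim_ definition above) =====
theorem extract_entropy_files_py_spec : Claim_equal_extract_entropy_files_py := by
  intro es _ hpre
  unfold Spec_extract_entropy_files_py extract_entropy_files_py extract_entropy_files_py_alt
  rw [pyA_outer_eq]
  rw [pvCollect_eq_alt es "entropy" hpre, pvCollect_eq_alt es "cross_entropy_loss" hpre]
  rfl
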